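-- pv_equiv track=rewrite | github.com/Yunuskngl/My_Codes_ | Python Özel ders/Öğrenci 3/ödev4/chem-zgoktepe-master/main.py | construct_matrix
-- ===== SOURCE A (Python) =====
-- def get_coeffs(atoms, side):
--   return [get_atom_in_side(atom,side) for atom in atoms]
--
-- def get_atom_in_side(atom, side):
--   return [get_num_atoms_in_compound(atom,compound) for compound in side] #liste yapııs oluşturur.
--
-- def get_num_atoms_in_compound(atom, compound):
--   for a,count in compound:
--     if a == atom:
--       return count
--   return 0
--
-- def negate_all_coefficients(coeffs):
--   return [[-num for num in lst] for lst in coeffs]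
--
-- def construct_matrix(atoms, reactants, products):
--   reactant_coeffs = get_coeffs(atoms, reactants)
--   product_coeffs = negate_all_coefficients(get_coeffs(atoms, products))
--
--   coeffs = []
--   for x in range(len(atoms)):
--     coeffs.append(reactant_coeffs[x] + product_coeffs[x])
--
--   # Add a dummy equation to complete the system of equations.
--   coeffs.append([1] + [0]*(len(coeffs[0])-1))
--   return coeffs
-- ===== SOURCE B (Python) =====
-- def construct_matrix(atoms, reactants, products):
--     n = len(reactants) + len(products)
--     # map atom -> list of row indices (duplicate atoms get all their rows)
--     rows = {}
--     for i, a in enumerate(atoms):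
--         rows.setdefault(a, []).append(i)
--     # scatter: start from a zero matrix and write each compound's counts
--     # into its column; a per-column 'seen' set keeps first-occurrence wins
--     matrix = [[0] * n for _ in atoms]
--     columns = [(c, 1) for c in reactants] + [(c, -1) for c in products]
--     for j, (compound, sign) in enumerate(columns):
--         seen = set()
--         for a, c in compound:
--             if a not in seen:
--                 seen.add(a)
--                 for i in rows.get(a, []):
--                     matrix[i][j] = sign * c
--     matrix.append([1] + [0] * (n - 1))
--     return matrix
-- ===== Notes on version B (the rewrite author's own statement) =====
-- stated objective: faster
-- what changed: Gather becomes scatter: instead of computing every matrix entry by scanning each compound once per atom and gluing two coefficient matrices, B builds an atom-to-row-indices index and a zero matrix, then makes one pass over the compounds writing each count (negated for products) into its column, a per-column seen-set giving first-occurrence semantics; each compound is scanned once instead of once per atom.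
import Mathlib
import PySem

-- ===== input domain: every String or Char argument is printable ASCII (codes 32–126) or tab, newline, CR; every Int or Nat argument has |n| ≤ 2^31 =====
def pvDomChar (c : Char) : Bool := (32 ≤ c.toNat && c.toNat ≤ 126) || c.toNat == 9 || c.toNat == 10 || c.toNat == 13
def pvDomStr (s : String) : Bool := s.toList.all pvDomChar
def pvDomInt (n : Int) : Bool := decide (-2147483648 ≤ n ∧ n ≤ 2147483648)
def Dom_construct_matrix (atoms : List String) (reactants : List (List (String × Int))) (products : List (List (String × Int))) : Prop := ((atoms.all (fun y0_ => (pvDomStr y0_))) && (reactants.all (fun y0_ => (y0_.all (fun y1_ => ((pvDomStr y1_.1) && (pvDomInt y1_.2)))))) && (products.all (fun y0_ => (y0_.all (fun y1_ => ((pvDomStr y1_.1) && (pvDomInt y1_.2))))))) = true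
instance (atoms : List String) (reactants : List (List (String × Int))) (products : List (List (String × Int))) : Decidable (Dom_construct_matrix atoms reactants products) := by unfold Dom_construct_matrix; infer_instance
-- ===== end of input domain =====

-- B replaces A's gather (each compound scanned once per atom, then two coefficient
-- matrices glued) by a scatter: an atom→row-indices index, a preallocated zero matrix, and
-- one pass over the compounds writing each first-occurrence count into its column
-- (faster: each compound is scanned once instead of once per atom).
-- Equivalence is on the return value (B mutates only its own fresh matrix).

-- ===== PORT A =====
def get_num_atoms_in_compound (atom : String) (compound : List (String × Int)) : Int :=
  match compound with
  | [] => 0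
  | (a, count) :: rest => if a == atom then count else get_num_atoms_in_compound atom rest

def get_atom_in_side (atom : String) (side : List (List (String × Int))) : List Int :=
  side.map (fun compound => get_num_atoms_in_compound atom compound)

def get_coeffs (atoms : List String) (side : List (List (String × Int))) : List (List Int) :=
  atoms.map (fun atom => get_atom_in_side atom side)

def negate_all_coefficients (coeffs : List (List Int)) : List (List Int) :=
  coeffs.map (fun lst => lst.map (fun num => -num))

def construct_matrix (atoms : List String) (reactants : List (List (String × Int))) (products : List (List (String × Int))) : List (List Int) :=
  let reactant_coeffs := get_coeffs atoms reactants
  let product_coeffs := negate_all_coefficients (get_coeffs atoms products)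
  let coeffs := (List.range atoms.length).foldl
    (fun acc x => acc ++ [reactant_coeffs.getD x [] ++ product_coeffs.getD x []]) []
  -- Python indexes coeffs[0] (IndexError when atoms = []; excluded by Pre_); .getD 0 [] stands for that in-range access
  coeffs ++ [[1] ++ List.replicate ((coeffs.getD 0 []).length - 1) 0]

-- ===== PORT B =====
-- rows.setdefault(a, []).append(i) over enumerate(atoms)
def pvRows (atoms : List String) : PySem.Dict String (List Nat) :=
  atoms.zipIdx.foldl (fun d p => d.modify p.1 [] (fun l => l ++ [p.2])) PySem.Dict.empty

-- for i in rows.get(a, []): matrix[i][j] = v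
def pvWriteCells (j : Nat) (v : Int) (L : List Nat) (m : List (List Int)) : List (List Int) :=
  L.foldl (fun m2 i => m2.set i ((m2.getD i []).set j v)) m

-- the body of 'for a, c in compound' with the per-column seen set
def pvScatterCompound (rows : PySem.Dict String (List Nat)) (j : Nat) (sgn : Int)
    (comp : List (String × Int)) (m : List (List Int)) : List (List Int) :=
  (comp.foldl (fun sm p =>
      if PySem.Set.contains sm.1 p.1 then sm
      else (PySem.Set.add sm.1 p.1, pvWriteCells j (sgn * p.2) (rows.getD p.1 []) sm.2))
    ((PySem.Set.empty : PySem.Set String), m)).2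

def construct_matrix_alt (atoms : List String) (reactants : List (List (String × Int))) (products : List (List (String × Int))) : List (List Int) :=
  let n := reactants.length + products.length
  let rows := pvRows atoms
  let matrix := atoms.map (fun _ => List.replicate n (0 : Int))
  let columns := reactants.map (fun c => (c, (1 : Int))) ++ products.map (fun c => (c, (-1 : Int)))
  let matrix := columns.zipIdx.foldl (fun m q => pvScatterCompound rows q.2 q.1.2 q.1.1 m) matrix
  matrix ++ [[1] ++ List.replicate (n - 1) 0]

-- ===== PRECONDITION & SPEC =====
-- Pre_ excludes only atoms = [], on which Python A raises IndexError at coeffs[0].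
def Pre_construct_matrix (atoms : List String) (reactants : List (List (String × Int))) (products : List (List (String × Int))) : Prop := atoms ≠ []
instance (atoms : List String) (reactants : List (List (String × Int))) (products : List (List (String × Int))) : Decidable (Pre_construct_matrix atoms reactants products) := by unfold Pre_construct_matrix; infer_instance
def pvWitness_construct_matrix : List String × (List (List (String × Int))) × (List (List (String × Int))) :=
  (["H", "O"], [[("H", 2)], [("O", 2)]], [[("H", 2), ("O", 1)]])

def Spec_construct_matrix (atoms : List String) (reactants : List (List (String × Int))) (products : List (List (String × Int))) (out : List (List Int)) : Prop := out = construct_matrix_alt atoms reactants products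
instance (atoms : List String) (reactants : List (List (String × Int))) (products : List (List (String × Int))) (out : List (List Int)) : Decidable (Spec_construct_matrix atoms reactants products out) := by unfold Spec_construct_matrix; infer_instance

-- ===== CLAIM (what is proved, stated in full; the proofs are below) =====
def Claim_equal_construct_matrix : Prop := ∀ (atoms : List String) (reactants : List (List (String × Int))) (products : List (List (String × Int))), Dom_construct_matrix atoms reactants products → Pre_construct_matrix atoms reactants products → Spec_construct_matrix atoms reactants products (construct_matrix atoms reactants products)

-- ===== LEMMAS AND PROOFS =====

-- first match of atom in a compound, as an option
def pvFirst (atom : String) (compound : List (String × Int)) : Option Int :=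
  match compound with
  | [] => none
  | (a, v) :: rest => if a == atom then some v else pvFirst atom rest

theorem gnaic_eq_pvFirst (atom : String) (compound : List (String × Int)) :
    get_num_atoms_in_compound atom compound = (pvFirst atom compound).getD 0 := by
  induction compound with
  | nil => rfl
  | cons p rest ih =>
    obtain ⟨a, v⟩ := p
    simp only [get_num_atoms_in_compound, pvFirst]
    by_cases he : a = atom <;> simp [he, ih]

theorem gnaic_of_first_none (atom : String) (compound : List (String × Int))
    (h : pvFirst atom compound = none) : get_num_atoms_in_compound atom compound = 0 := by
  rw [gnaic_eq_pvFirst, h]; rfl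

-- the atom→rows index: getD gives exactly the positions of that atom, in order
theorem pvRows_getD (atoms : List String) (a : String) :
    (pvRows atoms).getD a [] = (atoms.zipIdx.filter (fun p => p.1 == a)).map (·.2) := by
  unfold pvRows
  rw [PySem.Dict.getD_foldl_modify_append]
  simp

theorem mem_pvRows (atoms : List String) (a : String) (i : Nat) :
    i ∈ (pvRows atoms).getD a [] ↔ i < atoms.length ∧ atoms.getD i "" = a := by
  rw [pvRows_getD]
  simp only [List.mem_map, List.mem_filter]
  constructor
  · rintro ⟨⟨x, k⟩, ⟨hmem, hx⟩, rfl⟩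
    obtain ⟨-, hk, hxe⟩ := List.mem_zipIdx hmem
    simp only [Nat.zero_add] at hk
    refine ⟨hk, ?_⟩
    rw [List.getD_eq_getElem _ _ hk]
    have : atoms[k] = x := by simpa using hxe.symm
    rw [this]; simpa using hx
  · rintro ⟨hi, ha⟩
    refine ⟨(atoms[i], i), ⟨?_, ?_⟩, rfl⟩
    · rw [List.mem_zipIdx_iff_getElem?]
      simp [List.getElem?_eq_getElem hi]
    · rw [List.getD_eq_getElem _ _ hi] at ha
      simpa using ha

-- pvWriteCells: cell view and length
theorem pvWriteCells_getD (j : Nat) (v : Int) (L : List Nat) (m : List (List Int)) (i' : Nat) :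
    (pvWriteCells j v L m).getD i' [] =
      if i' ∈ L then (m.getD i' []).set j v else m.getD i' [] := by
  unfold pvWriteCells
  induction L generalizing m with
  | nil => simp
  | cons i tl ih =>
    rw [List.foldl_cons, ih]
    have hstep : ∀ i'' : Nat, (m.set i ((m.getD i []).set j v)).getD i'' [] =
        if i'' = i then (m.getD i []).set j v else m.getD i'' [] := by
      intro i''
      simp only [List.getD_eq_getElem?_getD, List.getElem?_set]
      by_cases he : i'' = i
      · subst he
        by_cases hl : i'' < m.length
        · simp [hl]
        · have : m[i'']? = none := by simpa using List.getElem?_eq_none (by omega)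
          simp [hl, this]
      · rw [if_neg (fun h => he h.symm), if_neg he]
    rw [hstep i']
    by_cases he : i' = i
    · subst he
      by_cases hmem : i' ∈ tl <;> simp [hmem, List.set_set]
    · by_cases hmem : i' ∈ tl <;> simp [hmem, he, List.mem_cons]

theorem pvWriteCells_length (j : Nat) (v : Int) (L : List Nat) (m : List (List Int)) :
    (pvWriteCells j v L m).length = m.length := by
  unfold pvWriteCells
  induction L generalizing m with
  | nil => rfl
  | cons i tl ih =>
    rw [List.foldl_cons, ih]
    simp

-- effect of one compound's scatter on one row, with an arbitrary starting seen set
theorem pvScatterAux_getD (atoms : List String) (j : Nat) (sgn : Int)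
    (comp : List (String × Int)) (s : PySem.Set String) (m : List (List Int)) (i' : Nat) :
    ((comp.foldl (fun sm p =>
        if PySem.Set.contains sm.1 p.1 then sm
        else (PySem.Set.add sm.1 p.1, pvWriteCells j (sgn * p.2) ((pvRows atoms).getD p.1 []) sm.2))
      (s, m)).2).getD i' [] =
    if i' < atoms.length ∧ atoms.getD i' "" ∉ s ∧ (pvFirst (atoms.getD i' "") comp).isSome = true
    then (m.getD i' []).set j (sgn * get_num_atoms_in_compound (atoms.getD i' "") comp)
    else m.getD i' [] := by
  generalize hx : atoms.getD i' "" = x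
  induction comp generalizing s m with
  | nil => simp [pvFirst]
  | cons p tl ih =>
    obtain ⟨a, c⟩ := p
    rw [List.foldl_cons]
    by_cases hc : PySem.Set.contains s a = true
    · rw [if_pos hc, ih s m]
      have ha : a ∈ s := (PySem.Set.contains_iff s a).mp hc
      by_cases hxa : x = a
      · have h1 : x ∈ s := hxa ▸ ha
        simp [h1]
      · have hne : ¬ a = x := fun h => hxa h.symm
        have h1 : pvFirst (x) ((a, c) :: tl) = pvFirst (x) tl := by
          simp [pvFirst, hne]
        have h2 : get_num_atoms_in_compound (x) ((a, c) :: tl)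
            = get_num_atoms_in_compound (x) tl := by
          simp [get_num_atoms_in_compound, hne]
        rw [h1, h2]
    · rw [if_neg hc, ih (PySem.Set.add s a) _]
      have ha : a ∉ s := fun h => hc ((PySem.Set.contains_iff s a).mpr h)
      rw [pvWriteCells_getD]
      simp only [mem_pvRows, hx]
      by_cases hlen : i' < atoms.length
      · by_cases hxa : x = a
        · subst hxa
          have hmem : x ∈ PySem.Set.add s x := by
            rw [PySem.Set.mem_add]; exact Or.inr rfl
          have h2 : get_num_atoms_in_compound x ((x, c) :: tl) = c := by
            simp [get_num_atoms_in_compound]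
          have h1 : (pvFirst x ((x, c) :: tl)).isSome = true := by
            simp [pvFirst]
          simp [hmem, hlen, h1, h2, ha]
        · have hne : ¬ a = x := fun h => hxa h.symm
          have hmem : x ∈ PySem.Set.add s a ↔ x ∈ s := by
            rw [PySem.Set.mem_add]; simp [hxa]
          have h1 : pvFirst (x) ((a, c) :: tl) = pvFirst (x) tl := by
            simp [pvFirst, hne]
          have h2 : get_num_atoms_in_compound (x) ((a, c) :: tl)
              = get_num_atoms_in_compound (x) tl := by
            simp [get_num_atoms_in_compound, hne]
          simp [hmem, hxa, h1, h2]
      · simp [hlen]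

theorem pvScatterCompound_getD (atoms : List String) (j : Nat) (sgn : Int)
    (comp : List (String × Int)) (m : List (List Int)) (i' : Nat) :
    (pvScatterCompound (pvRows atoms) j sgn comp m).getD i' [] =
    if i' < atoms.length ∧ (pvFirst (atoms.getD i' "") comp).isSome = true
    then (m.getD i' []).set j (sgn * get_num_atoms_in_compound (atoms.getD i' "") comp)
    else m.getD i' [] := by
  unfold pvScatterCompound
  rw [pvScatterAux_getD]
  simp [PySem.Set.empty]

theorem pvScatterCompound_length (rows : PySem.Dict String (List Nat)) (j : Nat) (sgn : Int)
    (comp : List (String × Int)) (m : List (List Int)) :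
    (pvScatterCompound rows j sgn comp m).length = m.length := by
  unfold pvScatterCompound
  suffices h : ∀ (s : PySem.Set String) (m : List (List Int)),
      ((comp.foldl (fun sm p =>
          if PySem.Set.contains sm.1 p.1 then sm
          else (PySem.Set.add sm.1 p.1, pvWriteCells j (sgn * p.2) (rows.getD p.1 []) sm.2))
        (s, m)).2).length = m.length from h _ m
  induction comp with
  | nil => intro s m; rfl
  | cons p tl ih =>
    intro s m
    rw [List.foldl_cons]
    by_cases hc : PySem.Set.contains s p.1 = true
    · rw [if_pos hc]; exact ih s m
    · rw [if_neg hc]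
      rw [ih]
      exact pvWriteCells_length _ _ _ _

-- row-level view of the whole column loop
theorem scatter_fold_getD (atoms : List String)
    (cols : List (List (String × Int) × Int)) (m : List (List Int)) (i' : Nat) :
    (cols.zipIdx.foldl (fun m q => pvScatterCompound (pvRows atoms) q.2 q.1.2 q.1.1 m) m).getD i' [] =
    cols.zipIdx.foldl (fun row q =>
        if i' < atoms.length ∧ (pvFirst (atoms.getD i' "") q.1.1).isSome = true
        then row.set q.2 (q.1.2 * get_num_atoms_in_compound (atoms.getD i' "") q.1.1)
        else row) (m.getD i' []) := by
  refine (List.foldl_hom (f := fun mm => mm.getD i' [])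
    (g₁ := fun m (q : (List (String × Int) × Int) × Nat) => pvScatterCompound (pvRows atoms) q.2 q.1.2 q.1.1 m)
    (g₂ := fun (row : List Int) (q : (List (String × Int) × Int) × Nat) =>
        if i' < atoms.length ∧ (pvFirst (atoms.getD i' "") q.1.1).isSome = true
        then row.set q.2 (q.1.2 * get_num_atoms_in_compound (atoms.getD i' "") q.1.1)
        else row) ?_).symm
  intro mm q
  exact (pvScatterCompound_getD atoms q.2 q.1.2 q.1.1 mm i').symm

-- a fold whose steps preserve a measure preserves it
theorem foldl_measure_pres {α β : Type} (g : α → β → α) (f : α → Nat)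
    (h : ∀ r q, f (g r q) = f r) : ∀ (l : List β) (init : α), f (l.foldl g init) = f init := by
  intro l
  induction l with
  | nil => intro init; rfl
  | cons q tl ih => intro init; rw [List.foldl_cons, ih, h]

-- the row fold never touches entries below the start index
theorem rowfold_getD_lt (x : String) (cs : List (List (String × Int) × Int)) :
    ∀ (k t : Nat) (row : List Int), t < k →
    ((cs.zipIdx k).foldl (fun r (q : (List (String × Int) × Int) × Nat) =>
        if (pvFirst x q.1.1).isSome = true
        then r.set q.2 (q.1.2 * get_num_atoms_in_compound x q.1.1) else r) row).getD t 0
      = row.getD t 0 := by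
  induction cs with
  | nil => intro k t row _; rfl
  | cons q0 tl ih =>
    intro k t row htk
    rw [List.zipIdx_cons, List.foldl_cons, ih (k + 1) t _ (by omega)]
    by_cases hhit : (pvFirst x q0.1).isSome = true
    · rw [if_pos hhit]
      simp only [List.getD_eq_getElem?_getD, List.getElem?_set]
      rw [if_neg (by omega)]
    · rw [if_neg hhit]

-- entry view of the row fold inside its index window
theorem rowfold_getD_main (x : String) (cs : List (List (String × Int) × Int)) :
    ∀ (k t : Nat) (row : List Int), k ≤ t → t - k < cs.length → t < row.length →
    ((cs.zipIdx k).foldl (fun r (q : (List (String × Int) × Int) × Nat) =>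
        if (pvFirst x q.1.1).isSome = true
        then r.set q.2 (q.1.2 * get_num_atoms_in_compound x q.1.1) else r) row).getD t 0
      = if (pvFirst x (cs.getD (t - k) ([], 0)).1).isSome = true
        then (cs.getD (t - k) ([], 0)).2 * get_num_atoms_in_compound x (cs.getD (t - k) ([], 0)).1
        else row.getD t 0 := by
  induction cs with
  | nil => intro k t row _ h2 _; simp at h2
  | cons q0 tl ih =>
    intro k t row hkt h2 hrow
    rw [List.zipIdx_cons, List.foldl_cons]
    by_cases hteq : t = k
    · subst hteq
      rw [rowfold_getD_lt x tl (t + 1) t _ (by omega)]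
      have h0 : t - t = 0 := by omega
      rw [h0, List.getD_cons_zero]
      by_cases hhit : (pvFirst x q0.1).isSome = true
      · rw [if_pos hhit, if_pos hhit]
        simp only [List.getD_eq_getElem?_getD, List.getElem?_set]
        simp [hrow]
      · rw [if_neg hhit, if_neg hhit]
    · have hk1 : k + 1 ≤ t := by omega
      have hrow1 : ∀ r : List Int,
          (if (pvFirst x q0.1).isSome = true
           then r.set k (q0.2 * get_num_atoms_in_compound x q0.1) else r).length = r.length := by
        intro r; split <;> simp
      rw [ih (k + 1) t _ hk1 (by simp only [List.length_cons] at h2; omega) (by rw [hrow1]; exact hrow)]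
      have hsucc : t - k = (t - (k + 1)) + 1 := by omega
      rw [hsucc, List.getD_cons_succ]
      by_cases hhit : (pvFirst x q0.1).isSome = true
      · rw [if_pos hhit]
        by_cases hhit2 : (pvFirst x (tl.getD (t - (k+1)) ([], 0)).1).isSome = true
        · rw [if_pos hhit2, if_pos hhit2]
        · rw [if_neg hhit2, if_neg hhit2]
          simp only [List.getD_eq_getElem?_getD, List.getElem?_set]
          rw [if_neg (by omega)]
      · rw [if_neg hhit]

-- one row of A's glued matrix equals the scattered row
theorem row_eq (atoms : List String) (reactants products : List (List (String × Int)))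
    (i : Nat) (hi : i < atoms.length) :
    (get_coeffs atoms reactants).getD i [] ++ (negate_all_coefficients (get_coeffs atoms products)).getD i []
    = ((reactants.map (fun c => (c, (1 : Int))) ++ products.map (fun c => (c, (-1 : Int)))).zipIdx.foldl
        (fun (row : List Int) (q : (List (String × Int) × Int) × Nat) =>
          if i < atoms.length ∧ (pvFirst (atoms.getD i "") q.1.1).isSome = true
          then row.set q.2 (q.1.2 * get_num_atoms_in_compound (atoms.getD i "") q.1.1) else row)
        (List.replicate (reactants.length + products.length) (0 : Int))) := by
  have hcond : (fun (row : List Int) (q : (List (String × Int) × Int) × Nat) =>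
        if i < atoms.length ∧ (pvFirst (atoms.getD i "") q.1.1).isSome = true
        then row.set q.2 (q.1.2 * get_num_atoms_in_compound (atoms.getD i "") q.1.1) else row)
      = (fun (row : List Int) (q : (List (String × Int) × Int) × Nat) =>
        if (pvFirst (atoms.getD i "") q.1.1).isSome = true
        then row.set q.2 (q.1.2 * get_num_atoms_in_compound (atoms.getD i "") q.1.1) else row) := by
    funext row q; simp [hi]
  rw [hcond]
  have hL : (get_coeffs atoms reactants).getD i [] = get_atom_in_side (atoms.getD i "") reactants := by
    simp [get_coeffs, List.getD_eq_getElem?_getD, List.getElem?_map,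
      List.getElem?_eq_getElem hi, List.getD_eq_getElem _ _ hi]
  have hP : (negate_all_coefficients (get_coeffs atoms products)).getD i []
      = (get_atom_in_side (atoms.getD i "") products).map (fun num => -num) := by
    simp [get_coeffs, negate_all_coefficients, List.getD_eq_getElem?_getD, List.getElem?_map,
      List.getElem?_eq_getElem hi, List.getD_eq_getElem _ _ hi]
  rw [hL, hP]
  have hfoldlen : ∀ row : List Int,
      (((reactants.map (fun c => (c, (1 : Int))) ++ products.map (fun c => (c, (-1 : Int)))).zipIdx).foldl
        (fun (row : List Int) (q : (List (String × Int) × Int) × Nat) =>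
          if (pvFirst (atoms.getD i "") q.1.1).isSome = true
          then row.set q.2 (q.1.2 * get_num_atoms_in_compound (atoms.getD i "") q.1.1) else row)
        row).length = row.length := by
    intro row
    exact foldl_measure_pres _ List.length (fun r q => by split <;> simp) _ row
  apply List.ext_getElem
  · rw [hfoldlen]; simp [get_atom_in_side]
  · intro t h1 h2
    have hcols : (reactants.map (fun c => (c, (1 : Int))) ++ products.map (fun c => (c, (-1 : Int)))).length
        = reactants.length + products.length := by simp
    have ht : t < reactants.length + products.length := by
      simpa [get_atom_in_side] using h1
    rw [← List.getD_eq_getElem _ 0 h2]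
    rw [rowfold_getD_main (atoms.getD i "") _ 0 t _ (by omega) (by simpa [hcols] using ht) (by simpa using ht)]
    have hts : t - 0 = t := by omega
    rw [hts]
    have hcget : ((reactants.map (fun c => (c, (1 : Int))) ++ products.map (fun c => (c, (-1 : Int)))).getD t ([], 0))
        = if hr : t < reactants.length then (reactants[t], (1 : Int)) else (products[t - reactants.length], (-1 : Int)) := by
      rw [List.getD_eq_getElem _ _ (by simpa [hcols] using ht), List.getElem_append]
      split
      · next hr => rw [dif_pos (by simpa using hr)]; simp
      · next hr => rw [dif_neg (by simpa using hr)]; simp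
    rw [hcget]
    by_cases hr : t < reactants.length
    · rw [dif_pos hr]
      have hA : (get_atom_in_side (atoms.getD i "") reactants
          ++ (get_atom_in_side (atoms.getD i "") products).map (fun num => -num))[t]
          = get_num_atoms_in_compound (atoms.getD i "") reactants[t] := by
        rw [List.getElem_append]
        rw [dif_pos (by simpa [get_atom_in_side] using hr)]
        simp [get_atom_in_side]
      rw [hA]
      by_cases hhit : (pvFirst (atoms.getD i "") reactants[t]).isSome = true
      · rw [if_pos hhit]; ring
      · rw [if_neg hhit]
        rw [gnaic_of_first_none _ _ (by simpa using hhit)]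
        rw [List.getD_replicate _ ht]
    · rw [dif_neg hr]
      have hpt : t - reactants.length < products.length := by omega
      have hA : (get_atom_in_side (atoms.getD i "") reactants
          ++ (get_atom_in_side (atoms.getD i "") products).map (fun num => -num))[t]
          = -(get_num_atoms_in_compound (atoms.getD i "") products[t - reactants.length]) := by
        rw [List.getElem_append]
        rw [dif_neg (by simpa [get_atom_in_side] using hr)]
        simp [get_atom_in_side]
      rw [hA]
      by_cases hhit : (pvFirst (atoms.getD i "") products[t - reactants.length]).isSome = true
      · rw [if_pos hhit]; ring
      · rw [if_neg hhit]
        rw [gnaic_of_first_none _ _ (by simpa using hhit)]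
        rw [List.getD_replicate _ ht]
        ring

theorem construct_matrix_spec' (atoms : List String)
    (reactants products : List (List (String × Int))) (h : atoms ≠ []) :
    construct_matrix atoms reactants products = construct_matrix_alt atoms reactants products := by
  have hpos : 0 < atoms.length := by
    cases atoms with
    | nil => exact absurd rfl h
    | cons a l => simp
  simp only [construct_matrix, construct_matrix_alt]
  rw [PySem.List.foldl_append_singleton_eq_map]
  simp only [List.nil_append]
  have hmain : (List.range atoms.length).map (fun x =>
        (get_coeffs atoms reactants).getD x [] ++ (negate_all_coefficients (get_coeffs atoms products)).getD x [])
      = ((reactants.map (fun c => (c, (1 : Int))) ++ products.map (fun c => (c, (-1 : Int)))).zipIdx.foldl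
          (fun m (q : (List (String × Int) × Int) × Nat) => pvScatterCompound (pvRows atoms) q.2 q.1.2 q.1.1 m)
          (atoms.map (fun _ => List.replicate (reactants.length + products.length) (0 : Int)))) := by
    have hslen : ((reactants.map (fun c => (c, (1 : Int))) ++ products.map (fun c => (c, (-1 : Int)))).zipIdx.foldl
          (fun m (q : (List (String × Int) × Int) × Nat) => pvScatterCompound (pvRows atoms) q.2 q.1.2 q.1.1 m)
          (atoms.map (fun _ => List.replicate (reactants.length + products.length) (0 : Int)))).length
        = atoms.length := by
      rw [foldl_measure_pres _ List.length (fun r q => pvScatterCompound_length _ _ _ _ r)]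
      simp
    apply List.ext_getElem
    · simp only [List.length_map, List.length_range, hslen]
    · intro i h1 h2
      have hi : i < atoms.length := by simpa using h1
      rw [List.getElem_map, List.getElem_range]
      rw [← List.getD_eq_getElem _ [] h2, scatter_fold_getD]
      have hbase : (atoms.map (fun _ => List.replicate (reactants.length + products.length) (0 : Int))).getD i []
          = List.replicate (reactants.length + products.length) (0 : Int) := by
        rw [List.getD_eq_getElem _ [] (by simpa using hi)]
        simp
      rw [hbase]
      exact row_eq atoms reactants products i hi
  have hdum : (((List.range atoms.length).map (fun x =>
        (get_coeffs atoms reactants).getD x [] ++ (negate_all_coefficients (get_coeffs atoms products)).getD x [])).getD 0 []).length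
      = reactants.length + products.length := by
    rw [List.getD_eq_getElem _ [] (by simp [hpos])]
    rw [List.getElem_map, List.getElem_range]
    simp [get_coeffs, negate_all_coefficients, get_atom_in_side, List.getD_eq_getElem?_getD,
      List.getElem?_map, List.getElem?_eq_getElem hpos]
  rw [hdum, hmain]

-- ===== VERDICT (by name: the statement is the Claim_ definition above) =====
theorem construct_matrix_spec : Claim_equal_construct_matrix := by
  intro atoms reactants products _ hpre
  unfold Spec_construct_matrix
  exact construct_matrix_spec' atoms reactants products hpre
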